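-- pv_equiv track=rewrite | github.com/m-popovic/hjerson | hjerson.py | block_count
-- ===== SOURCE A (Python) =====
-- def block_count(errcats, errcat, blockcount):
--     i = 0
--     newblock = True
--     while i < len(errcats):
--         cat = errcats[i]
--         if cat == errcat:
--             if newblock == True:
--                 blockcount += 1
--                 newblock = False
--         else:
--             newblock = True
--
--         i += 1
--
--     return blockcount
-- ===== SOURCE B (Python) =====
-- def block_count(errcats, errcat, blockcount):
--     # A block start is a position whose value matches errcat while its
--     # predecessor (None at the front) does not: sum those in one pass.
--     return blockcount + sum(1 for prev, cur in zip([None] + list(errcats), errcats)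
--                             if cur == errcat and prev != errcat)
-- ===== Notes on version B (the rewrite author's own statement) =====
-- stated objective: idiomatic
-- what changed: Replaces the index while-loop with a carried newblock flag by a stateless pairwise zip that counts positions where the value equals errcat and its predecessor does not.
import Mathlib
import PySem

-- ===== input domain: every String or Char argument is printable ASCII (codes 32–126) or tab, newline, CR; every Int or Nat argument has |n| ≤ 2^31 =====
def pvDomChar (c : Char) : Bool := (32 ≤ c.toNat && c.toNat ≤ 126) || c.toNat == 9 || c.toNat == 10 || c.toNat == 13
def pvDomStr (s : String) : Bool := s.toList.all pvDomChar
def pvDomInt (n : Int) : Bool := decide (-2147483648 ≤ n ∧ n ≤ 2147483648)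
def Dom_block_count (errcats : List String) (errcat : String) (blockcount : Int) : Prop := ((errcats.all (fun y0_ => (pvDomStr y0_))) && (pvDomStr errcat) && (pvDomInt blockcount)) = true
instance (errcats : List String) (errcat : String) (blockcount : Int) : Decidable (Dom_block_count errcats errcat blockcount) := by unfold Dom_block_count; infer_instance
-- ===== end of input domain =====

-- ===== PORT A =====
-- literal port of A: the while-loop over indices becomes a fold carrying (newblock, blockcount)
def block_count (errcats : List String) (errcat : String) (blockcount : Int) : Int :=
  (errcats.foldl (fun (st : Bool × Int) cat =>
      if cat == errcat then
        (if st.1 then (false, st.2 + 1) else st)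
      else
        (true, st.2))
    (true, blockcount)).2

-- ===== PORT B =====
-- port of B: count positions whose value is errcat while the predecessor (none at the front) is not
def block_count_alt (errcats : List String) (errcat : String) (blockcount : Int) : Int :=
  blockcount +
    (((none :: errcats.map some).zip (errcats.map some)).filter
      (fun pc => pc.2 == some errcat && !(pc.1 == some errcat))).length

-- ===== PRECONDITION & SPEC =====
def Spec_block_count (errcats : List String) (errcat : String) (blockcount : Int) (out : Int) : Prop := out = block_count_alt errcats errcat blockcount
instance (errcats : List String) (errcat : String) (blockcount : Int) (out : Int) : Decidable (Spec_block_count errcats errcat blockcount out) := by unfold Spec_block_count; infer_instance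

-- ===== CLAIM (what is proved, stated in full; the proofs are below) =====
def Claim_equal_block_count : Prop := ∀ (errcats : List String) (errcat : String) (blockcount : Int), Dom_block_count errcats errcat blockcount → Spec_block_count errcats errcat blockcount (block_count errcats errcat blockcount)

-- ===== LEMMAS AND PROOFS =====

-- ===== VERDICT (by name: the statement is the Claim_ definition above) =====
-- invariant: the flag newblock equals "previous element (as Option) differs from errcat"
theorem bc_fold_eq (e : String) :
    ∀ (l : List String) (bc : Int) (prev : Option String),
      (l.foldl (fun (st : Bool × Int) cat =>
          if cat == e then (if st.1 then (false, st.2 + 1) else st) else (true, st.2))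
        (!(prev == some e), bc)).2
      = bc + (((prev :: l.map some).zip (l.map some)).filter
          (fun pc => pc.2 == some e && !(pc.1 == some e))).length := by
  intro l
  induction l with
  | nil => intro bc prev; simp
  | cons x t ih =>
    intro bc prev
    by_cases hx : x = e
    · subst hx
      by_cases hp : prev = some x
      · have h := ih bc (some x)
        simp only [beq_self_eq_true, Bool.not_true] at h
        simpa [hp] using h
      · have h := ih (bc + 1) (some x)
        simp [hp] at h ⊢
        omega
    · have h := ih bc (some x)
      have hnx : (some x == some e) = false := by simp [hx]
      rw [hnx] at h
      simp only [Bool.not_false] at h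
      simpa [hx, hnx] using h

theorem block_count_spec : Claim_equal_block_count := by
  intro errcats errcat blockcount _
  unfold Spec_block_count block_count block_count_alt
  have := bc_fold_eq errcat errcats blockcount none
  simpa using this
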